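-- pv_equiv track=rewrite | github.com/upkero/university | course2/sem4/AOIS/lab3/src/common/boolean.py | index_to_assignment
-- ===== SOURCE A (Python) =====
-- def index_to_assignment(index: int, dimension: int) -> tuple[int, ...]:
--     if dimension < 0:
--         raise ValueError("Dimension must be non-negative.")
--     if dimension == 0:
--         return tuple()
--     if index < 0 or index >= (1 << dimension):
--         raise ValueError("Index is out of range for the given dimension.")
--     return tuple((index >> shift) & 1 for shift in range(dimension - 1, -1, -1))
-- ===== SOURCE B (Python) =====
-- def index_to_assignment(index: int, dimension: int) -> tuple[int, ...]:
--     if dimension < 0: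
--         raise ValueError("Dimension must be non-negative.")
--     if dimension == 0:
--         return tuple()
--     if index < 0 or index >= (1 << dimension):
--         raise ValueError("Index is out of range for the given dimension.")
--     s = format(index, f"0{dimension}b")
--     return tuple(int(c) for c in s)
-- ===== Notes on version B (the rewrite author's own statement) =====
-- stated objective: idiomatic
-- what changed: Replaces the per-position shift-and-mask generator with binary string formatting (format(index, f'0{dimension}b')) followed by digit parsing.
import Mathlib
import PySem

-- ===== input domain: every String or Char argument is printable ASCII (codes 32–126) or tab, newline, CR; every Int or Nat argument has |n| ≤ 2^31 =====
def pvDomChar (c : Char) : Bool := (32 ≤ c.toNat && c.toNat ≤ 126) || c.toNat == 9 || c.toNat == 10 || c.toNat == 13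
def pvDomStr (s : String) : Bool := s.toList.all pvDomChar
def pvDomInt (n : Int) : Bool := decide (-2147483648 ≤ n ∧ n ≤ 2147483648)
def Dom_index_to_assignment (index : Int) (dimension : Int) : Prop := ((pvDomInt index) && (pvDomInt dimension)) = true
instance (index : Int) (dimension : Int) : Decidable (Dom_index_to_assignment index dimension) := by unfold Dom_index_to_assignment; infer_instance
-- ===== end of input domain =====

-- B converts the index with binary string formatting instead of per-position bit shifting (idiomatic rewrite, same cost).

-- ===== PORT A =====
-- (index >> shift) & 1 is ported exactly as floor-division by 2^shift followed by floor-mod 2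
-- (Python's >> is an arithmetic shift = floor division; x & 1 = x mod 2 for every int).
def index_to_assignment (index : Int) (dimension : Int) : List Int :=
  if dimension < 0 then []        -- raise ValueError (outside Pre_)
  else if dimension = 0 then []
  else if index < 0 ∨ (2:Int)^dimension.toNat ≤ index then []  -- raise ValueError (outside Pre_)
  else (PySem.List.pyRange (dimension - 1) (-1) (-1)).map
        (fun shift => PySem.Int.mod (PySem.Int.floordiv index ((2:Int)^shift.toNat)) 2)

-- ===== PORT B =====
-- binChars n = binary digits of n, most significant first (empty for n = 0; the '0'-padding
-- below makes the padded string identical to Python's format(index, f"0{dimension}b"), which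
-- for index = 0 is dimension ≥ 1 zero characters).
def binChars : Nat → List Char
  | 0 => []
  | (n+1) => binChars ((n+1) / 2) ++ [if (n+1) % 2 = 1 then '1' else '0']

def index_to_assignment_alt (index : Int) (dimension : Int) : List Int :=
  if dimension < 0 then []        -- raise ValueError (outside Pre_)
  else if dimension = 0 then []
  else if index < 0 ∨ (2:Int)^dimension.toNat ≤ index then []  -- raise ValueError (outside Pre_)
  else
    -- s = format(index, f"0{dimension}b")
    let s : List Char :=
      List.replicate (dimension.toNat - (binChars index.toNat).length) '0' ++ binChars index.toNat
    -- int(c) for a single digit char is its code minus 48 (exact on '0'/'1')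
    s.map (fun c => ((c.toNat : Int) - 48))

-- ===== PRECONDITION & SPEC =====
-- A raises ValueError when dimension < 0, or when dimension > 0 and index ∉ [0, 2^dimension); Pre_ excludes exactly those.
def Pre_index_to_assignment (index : Int) (dimension : Int) : Prop :=
  0 ≤ dimension ∧ (dimension = 0 ∨ (0 ≤ index ∧ index < (2:Int)^dimension.toNat))
instance (index : Int) (dimension : Int) : Decidable (Pre_index_to_assignment index dimension) := by
  unfold Pre_index_to_assignment; infer_instance
def pvWitness_index_to_assignment : Int × Int := (5, 3)

def Spec_index_to_assignment (index : Int) (dimension : Int) (out : List Int) : Prop :=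
  out = index_to_assignment_alt index dimension
instance (index : Int) (dimension : Int) (out : List Int) : Decidable (Spec_index_to_assignment index dimension out) := by
  unfold Spec_index_to_assignment; infer_instance

-- ===== CLAIM (what is proved, stated in full; the proofs are below) =====
def Claim_equal_index_to_assignment : Prop := ∀ (index : Int) (dimension : Int), Dom_index_to_assignment index dimension → Pre_index_to_assignment index dimension → Spec_index_to_assignment index dimension (index_to_assignment index dimension)

-- ===== LEMMAS AND PROOFS =====

-- proof-side integer digit list, most significant first
def binDigits : Nat → List Int
  | 0 => []
  | (n+1) => binDigits ((n+1) / 2) ++ [(((n+1) % 2 : Nat) : Int)]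

theorem binChars_map (n : Nat) :
    (binChars n).map (fun c => ((c.toNat : Int) - 48)) = binDigits n := by
  induction n using Nat.strong_induction_on with
  | _ n ih =>
    match n with
    | 0 => simp [binChars, binDigits]
    | (m+1) =>
      rw [binChars, binDigits, List.map_append, ih ((m+1)/2) (by omega)]
      rcases Nat.mod_two_eq_zero_or_one (m+1) with h | h <;> simp [h]

theorem binChars_length_eq (n : Nat) : (binChars n).length = (binDigits n).length := by
  have := congrArg List.length (binChars_map n)
  simpa using this

-- main bridge: the descending-shift bit map equals the zero-padded binary digit list
theorem range_bits_eq (d n : Nat) (h : n < 2^d) :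
    (List.range d).map (fun k => ((n / 2^(d-1-k) % 2 : Nat) : Int))
      = List.replicate (d - (binDigits n).length) 0 ++ binDigits n := by
  induction d generalizing n with
  | zero => interval_cases n; simp [binDigits]
  | succ d ih =>
    have hstep : (List.range (d+1)).map (fun k => ((n / 2^(d-k) % 2 : Nat) : Int))
        = (List.range d).map (fun k => (((n/2) / 2^(d-1-k) % 2 : Nat) : Int)) ++ [((n % 2 : Nat) : Int)] := by
      rw [List.range_succ, List.map_append]
      congr 1
      · apply List.map_congr_left
        intro k hk
        have hk' : k < d := List.mem_range.mp hk
        have : d - k = (d - 1 - k) + 1 := by omega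
        rw [this, pow_succ, Nat.div_div_eq_div_mul, Nat.mul_comm, ← Nat.div_div_eq_div_mul]
      · simp
    rw [show (fun k : Nat => ((n / 2^(d+1-1-k) % 2 : Nat) : Int)) = (fun k : Nat => ((n / 2^(d-k) % 2 : Nat) : Int)) from funext fun k => by norm_num, hstep]
    match n with
    | 0 =>
      rw [ih 0 (by positivity)]
      simp [binDigits, List.replicate_succ']
    | (m+1) =>
      rw [ih ((m+1)/2) (by omega), binDigits]
      simp only [List.length_append, List.length_singleton]
      rw [show d + 1 - ((binDigits ((m+1)/2)).length + 1) = d - (binDigits ((m+1)/2)).length from by omega]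
      simp [List.append_assoc]

-- pointwise: the Python bit expression equals the Nat formula, for nonnegative index
theorem bit_cast (n s : Nat) :
    PySem.Int.mod (PySem.Int.floordiv (n : Int) ((2:Int)^s)) 2 = ((n / 2^s % 2 : Nat) : Int) := by
  have h1 : ((2:Int)^s) = ((2^s : Nat) : Int) := by push_cast; ring
  rw [h1, PySem.Int.floordiv_natCast n (2^s),
      show (2:Int) = ((2:Nat) : Int) from rfl, PySem.Int.mod_natCast]

-- ===== VERDICT (by name: the statement is the Claim_ definition above) =====
theorem index_to_assignment_spec : Claim_equal_index_to_assignment := by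
  intro index dimension _ hpre
  obtain ⟨hd, hcase⟩ := hpre
  unfold Spec_index_to_assignment index_to_assignment index_to_assignment_alt
  rcases hcase with h0 | ⟨hi0, hilt⟩
  · simp [h0]
  · by_cases hz : dimension = 0
    · simp [hz]
    · have hdpos : ¬ dimension < 0 := by omega
      have hrange : ¬ (index < 0 ∨ (2:Int)^dimension.toNat ≤ index) := by
        push Not; exact ⟨hi0, by omega⟩
      simp only [if_neg hdpos, if_neg hz, if_neg hrange]
      set d : Nat := dimension.toNat with hd'
      have hdim : dimension = (d : Int) := by omega
      set n : Nat := index.toNat with hn'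
      have hidx : index = (n : Int) := by omega
      have hnlt : n < 2^d := by
        have : ((n : Int)) < ((2^d : Nat) : Int) := by rw [← hidx]; push_cast; omega
        exact_mod_cast this
      -- A side: pyRange (d-1) (-1) (-1) = (range d).map (fun k => ↑d - 1 - ↑k)
      rw [PySem.List.pyRange_neg_one]
      have hlen : ((dimension - 1) - (-1)).toNat = d := by omega
      rw [hlen, List.map_map]
      -- reduce A's elements to the Nat bit formula, then apply the bridge lemmas
      have hA : (List.range d).map
            ((fun shift => PySem.Int.mod (PySem.Int.floordiv index ((2:Int)^shift.toNat)) 2) ∘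
             (fun k : Nat => dimension - 1 - (k : Int)))
          = (List.range d).map (fun k => ((n / 2^(d-1-k) % 2 : Nat) : Int)) := by
        apply List.map_congr_left
        intro k hk
        have hk' : k < d := List.mem_range.mp hk
        have ht : (dimension - 1 - (k : Int)).toNat = d - 1 - k := by omega
        simp only [Function.comp, ht, hidx]
        exact bit_cast n (d - 1 - k)
      rw [hA, range_bits_eq d n hnlt]
      rw [List.map_append, binChars_map, List.map_replicate, binChars_length_eq]
      norm_num
      exact Or.inr (by decide)
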